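-- pv_equiv track=rewrite | github.com/S-Tarr/Quinto | quinto.py | verticalTotal
-- ===== SOURCE A (Python) =====
-- def verticalTotal(i, j, val, newBoard):
--     n, m, = i, j
--     currSum = val
--     length = 1
--     while n-1 >= 0 and newBoard[n-1][m] != -1:
--         currSum += newBoard[n-1][m]
--         n-=1
--         length += 1
--     n, m = i, j
--     while n+1 < len(newBoard) and newBoard[n+1][j] != -1:
--         currSum += newBoard[n+1][m]
--         n+=1
--         length += 1
--
--     return currSum, length
-- ===== SOURCE B (Python) =====
-- def verticalTotal(i, j, val, newBoard):
--     # Materialize column j once, then sum the contiguous non-(-1) run around row i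
--     # with a single recursive direction-parameterized walker.
--     col = [row[j] for row in newBoard]
--
--     def run(r, di):
--         if 0 <= r < len(col) and col[r] != -1:
--             s, c = run(r + di, di)
--             return s + col[r], c + 1
--         return 0, 0
--
--     us, uc = run(i - 1, -1)
--     ds, dc = run(i + 1, 1)
--     return val + us + ds, 1 + uc + dc
-- ===== Notes on version B (the rewrite author's own statement) =====
-- stated objective: alternative
-- what changed: B extracts column j into a list once, then sums the contiguous non-(-1) run around row i with a single recursive direction-parameterized walker, instead of A's two copied stateful while-loops doing repeated two-dimensional indexing.
-- intended difference: For start rows i < -1 (an off-board cell) A returns a run summed by walking Python-wrapped negative row indices (it starts reading at newBoard[i+1], i.e. from the end of the board), while B returns (val, 1) since no adjacent row is on the board, which is the intended value for an off-board start. — e.g. on verticalTotal(-2, 0, 5, [[1, 2], [3, 4]]): A returns (12, 4), B returns (5, 1)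
-- outside the precondition, e.g. on verticalTotal(0, 1, 2, [[3, 4], [-1, -1], [5]]): A returns (2, 1), B raises IndexError
import Mathlib
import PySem

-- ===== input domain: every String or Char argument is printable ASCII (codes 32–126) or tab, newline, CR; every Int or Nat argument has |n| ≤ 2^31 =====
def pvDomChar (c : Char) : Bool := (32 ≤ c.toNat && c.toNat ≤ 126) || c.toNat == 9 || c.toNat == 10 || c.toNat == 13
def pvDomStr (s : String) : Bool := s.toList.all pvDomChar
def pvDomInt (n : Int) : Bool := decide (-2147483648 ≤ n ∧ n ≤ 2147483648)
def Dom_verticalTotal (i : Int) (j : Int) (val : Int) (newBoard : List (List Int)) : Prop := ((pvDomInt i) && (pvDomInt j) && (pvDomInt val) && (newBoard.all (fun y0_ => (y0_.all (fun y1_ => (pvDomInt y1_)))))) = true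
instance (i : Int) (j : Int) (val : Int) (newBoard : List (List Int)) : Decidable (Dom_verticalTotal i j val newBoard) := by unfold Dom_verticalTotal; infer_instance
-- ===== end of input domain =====

-- B materializes column j once and sums the run with one recursive direction-parameterized walker,
-- instead of A's two copied while loops; equal on Pre_ outside D_ (i < -1), where A's answer comes
-- from Python negative-row wraparound.

-- board[r][c] with Python index semantics; none = IndexError (excluded by Pre_)
def pvGet2 (nb : List (List Int)) (r c : Int) : Option Int :=
  (PySem.List.pyGet? nb r).bind (fun row => PySem.List.pyGet? row c)

-- ===== PORT A =====
-- A's first while loop: state (n, currSum, length); fuel bounds the iterations (n decreases while n-1 ≥ 0)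
def vtUpA (nb : List (List Int)) (m : Int) : Nat → Int → Int → Int → Int × Int
  | 0, _, s, c => (s, c)
  | f+1, n, s, c =>
    if n - 1 ≥ 0 then
      match pvGet2 nb (n-1) m with
      | some v => if v ≠ -1 then vtUpA nb m f (n-1) (s+v) (c+1) else (s, c)
      | none => (s, c)      -- Python raises IndexError here; Pre_ excludes it
    else (s, c)

-- A's second while loop (it tests newBoard[n+1][j] and adds newBoard[n+1][m]; m = j throughout, one lookup)
def vtDownA (nb : List (List Int)) (m : Int) : Nat → Int → Int → Int → Int × Int
  | 0, _, s, c => (s, c)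
  | f+1, n, s, c =>
    if n + 1 < (nb.length : Int) then
      match pvGet2 nb (n+1) m with
      | some v => if v ≠ -1 then vtDownA nb m f (n+1) (s+v) (c+1) else (s, c)
      | none => (s, c)      -- Python raises IndexError here; Pre_ excludes it
    else (s, c)

def verticalTotal (i : Int) (j : Int) (val : Int) (newBoard : List (List Int)) : Int × Int :=
  let p := vtUpA newBoard j i.toNat i val 1
  vtDownA newBoard j (newBoard.length + (-i).toNat + 1) i p.1 p.2

-- ===== PORT B =====
-- B's comprehension [row[j] for row in newBoard]; none = some row[j] raised IndexError (outside Pre_)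
def vtCol (nb : List (List Int)) (j : Int) : Option (List Int) :=
  match nb with
  | [] => some []
  | row :: rest =>
    match PySem.List.pyGet? row j, vtCol rest j with
    | some v, some cs => some (v :: cs)
    | _, _ => none

-- B's recursive walker over the column: from index r, step di while in range and not a -1 barrier
def vtRun (col : List Int) (di : Int) : Nat → Int → Int × Int
  | 0, _ => (0, 0)
  | f+1, r =>
    if 0 ≤ r ∧ r < (col.length : Int) then
      match PySem.List.pyGet? col r with
      | some v =>
        if v ≠ -1 then
          let p := vtRun col di f (r + di)
          (p.1 + v, p.2 + 1)
        else (0, 0)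
      | none => (0, 0)      -- unreachable: 0 ≤ r < len
    else (0, 0)

def verticalTotal_alt (i : Int) (j : Int) (val : Int) (newBoard : List (List Int)) : Int × Int :=
  match vtCol newBoard j with
  | none => (0, 0)          -- Python B raises IndexError here; Pre_ excludes it
  | some col =>
    let u := vtRun col (-1) col.length (i - 1)
    let d := vtRun col 1 col.length (i + 1)
    (val + u.1 + d.1, 1 + u.2 + d.2)

-- ===== PRECONDITION & SPEC =====
-- Pre_ = -(len+1) ≤ i ≤ len (further out A's first row access raises IndexError) and column j a
-- valid (possibly negative) Python index of every row: on ragged boards violating this A raises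
-- IndexError when its walk reaches a short row (and B always raises extracting the column).
def Pre_verticalTotal (i : Int) (j : Int) (val : Int) (newBoard : List (List Int)) : Prop :=
  -((newBoard.length : Int) + 1) ≤ i ∧ i ≤ (newBoard.length : Int) ∧
  ∀ row ∈ newBoard, -(row.length : Int) ≤ j ∧ j < (row.length : Int)
instance (i : Int) (j : Int) (val : Int) (newBoard : List (List Int)) : Decidable (Pre_verticalTotal i j val newBoard) := by unfold Pre_verticalTotal; infer_instance
def pvWitness_verticalTotal : Int × Int × Int × List (List Int) := (0, 1, 5, [[1, 2], [3, 4], [-1, 7]])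

-- On start rows i < -1 (an off-board cell) A returns a run accumulated by walking Python-wrapped
-- negative row indices (it starts reading at newBoard[i+1], i.e. from the end of the board), while
-- B returns (val, 1) — no adjacent on-board run — which is the intended value for an off-board start.
def D_verticalTotal (i : Int) (j : Int) (val : Int) (newBoard : List (List Int)) : Prop := i < -1
instance (i : Int) (j : Int) (val : Int) (newBoard : List (List Int)) : Decidable (D_verticalTotal i j val newBoard) := by unfold D_verticalTotal; infer_instance

def Spec_verticalTotal (i : Int) (j : Int) (val : Int) (newBoard : List (List Int)) (out : Int × Int) : Prop := ¬ D_verticalTotal i j val newBoard → out = verticalTotal_alt i j val newBoard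
instance (i : Int) (j : Int) (val : Int) (newBoard : List (List Int)) (out : Int × Int) : Decidable (Spec_verticalTotal i j val newBoard out) := by unfold Spec_verticalTotal; infer_instance

def pvDiffWitness_verticalTotal : Int × Int × Int × List (List Int) := (-2, 0, 5, [[1, 2], [3, 4]])
def pvDiffWitnessOut_verticalTotal : (Int × Int) × (Int × Int) := ((12, 4), (5, 1))

-- ===== CLAIM (what is proved, stated in full; the proofs are below) =====
def Claim_unchanged_verticalTotal : Prop := ∀ (i : Int) (j : Int) (val : Int) (newBoard : List (List Int)), Dom_verticalTotal i j val newBoard → Pre_verticalTotal i j val newBoard → Spec_verticalTotal i j val newBoard (verticalTotal i j val newBoard)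
def Claim_changed_verticalTotal : Prop := Dom_verticalTotal (pvDiffWitness_verticalTotal.1) (pvDiffWitness_verticalTotal.2.1) (pvDiffWitness_verticalTotal.2.2.1) (pvDiffWitness_verticalTotal.2.2.2) ∧ Pre_verticalTotal (pvDiffWitness_verticalTotal.1) (pvDiffWitness_verticalTotal.2.1) (pvDiffWitness_verticalTotal.2.2.1) (pvDiffWitness_verticalTotal.2.2.2) ∧ D_verticalTotal (pvDiffWitness_verticalTotal.1) (pvDiffWitness_verticalTotal.2.1) (pvDiffWitness_verticalTotal.2.2.1) (pvDiffWitness_verticalTotal.2.2.2) ∧ verticalTotal (pvDiffWitness_verticalTotal.1) (pvDiffWitness_verticalTotal.2.1) (pvDiffWitness_verticalTotal.2.2.1) (pvDiffWitness_verticalTotal.2.2.2) = pvDiffWitnessOut_verticalTotal.1 ∧ verticalTotal_alt (pvDiffWitness_verticalTotal.1) (pvDiffWitness_verticalTotal.2.1) (pvDiffWitness_verticalTotal.2.2.1) (pvDiffWitness_verticalTotal.2.2.2) = pvDiffWitnessOut_verticalTotal.2 ∧ pvDiffWitnessOut_verticalTotal.1 ≠ pvDiffWitnessOut_verticalTotal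.2

-- ===== LEMMAS AND PROOFS =====

lemma vtRun_stop (col : List Int) (di : Int) (f : Nat) (r : Int)
    (h : ¬ (0 ≤ r ∧ r < (col.length : Int))) : vtRun col di f r = (0, 0) := by
  cases f <;> simp [vtRun, h]

-- Under Pre_'s column condition the comprehension succeeds and col mirrors pvGet2 on every row index.
lemma vtCol_spec (nb : List (List Int)) (j : Int)
    (hcol : ∀ row ∈ nb, -(row.length : Int) ≤ j ∧ j < (row.length : Int)) :
    ∃ col, vtCol nb j = some col ∧ col.length = nb.length ∧
      ∀ r : Int, 0 ≤ r → r < (nb.length : Int) → PySem.List.pyGet? col r = pvGet2 nb r j := by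
  induction nb with
  | nil => exact ⟨[], rfl, rfl, fun r h0 h1 => by simp at h1; omega⟩
  | cons row rest ih =>
      obtain ⟨hl, hr⟩ := hcol row (by simp)
      obtain ⟨v, hv⟩ : ∃ v, PySem.List.pyGet? row j = some v := by
        cases hj : PySem.List.pyGet? row j with
        | none =>
            rw [PySem.List.pyGet?_eq_none_iff] at hj
            exact absurd (by exact ⟨hl, hr⟩) hj
        | some v => exact ⟨v, rfl⟩
      obtain ⟨cs, hcs, hlen, hidx⟩ := ih (fun r hm => hcol r (by simp [hm]))
      refine ⟨v :: cs, by simp [vtCol, hv, hcs], by simp [hlen], ?_⟩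
      intro r h0 h1
      by_cases hz : r = 0
      · subst hz
        simp [PySem.List.pyGet?_zero_cons, pvGet2, hv]
      · have h1' : 0 ≤ r - 1 := by omega
        have htn : r.toNat = (r - 1).toNat + 1 := by omega
        have hrhs : pvGet2 (row :: rest) r j = pvGet2 rest (r - 1) j := by
          unfold pvGet2
          rw [PySem.List.pyGet?_of_nonneg (row :: rest) h0, PySem.List.pyGet?_of_nonneg rest h1',
              htn, List.getElem?_cons_succ]
        have hlhs := hidx (r - 1) h1' (by simp at h1; omega)
        rw [hrhs, ← hlhs, PySem.List.pyGet?_of_nonneg (v :: cs) h0,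
            PySem.List.pyGet?_of_nonneg cs h1', htn, List.getElem?_cons_succ]

lemma pvGet2_some (nb : List (List Int)) (j r : Int)
    (hcol : ∀ row ∈ nb, -(row.length : Int) ≤ j ∧ j < (row.length : Int))
    (h0 : 0 ≤ r) (h1 : r < (nb.length : Int)) : ∃ v, pvGet2 nb r j = some v := by
  have hlt : r.toNat < nb.length := by omega
  have hrow : PySem.List.pyGet? nb r = some (nb[r.toNat]) :=
    PySem.List.pyGet?_eq_some_getElem nb h0 (by exact_mod_cast h1)
  have hmem : nb[r.toNat] ∈ nb := List.getElem_mem hlt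
  obtain ⟨hl, hr⟩ := hcol _ hmem
  cases hj : PySem.List.pyGet? nb[r.toNat] j with
  | none =>
      rw [PySem.List.pyGet?_eq_none_iff] at hj
      exact absurd (by exact ⟨hl, hr⟩) hj
  | some v => exact ⟨v, by simp [pvGet2, hrow, hj]⟩

lemma upA_eq_run (nb : List (List Int)) (col : List Int) (j : Int)
    (hcol : ∀ row ∈ nb, -(row.length : Int) ≤ j ∧ j < (row.length : Int))
    (hlen : col.length = nb.length)
    (hidx : ∀ r : Int, 0 ≤ r → r < (nb.length : Int) → PySem.List.pyGet? col r = pvGet2 nb r j) :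
    ∀ (f1 f2 : Nat) (n s c : Int), n ≤ (nb.length : Int) → n.toNat ≤ f1 → n.toNat ≤ f2 →
      vtUpA nb j f1 n s c =
        (s + (vtRun col (-1) f2 (n - 1)).1, c + (vtRun col (-1) f2 (n - 1)).2) := by
  intro f1
  induction f1 with
  | zero =>
      intro f2 n s c hle hf1 hf2
      have hn : n ≤ 0 := by omega
      rw [vtRun_stop col (-1) f2 (n - 1) (by omega)]
      simp [vtUpA]
  | succ f1' ih =>
      intro f2 n s c hle hf1 hf2
      by_cases hg : n - 1 ≥ 0
      · obtain ⟨v, hv⟩ := pvGet2_some nb j (n - 1) hcol (by omega) (by omega)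
        have hv' : PySem.List.pyGet? col (n - 1) = some v := by
          rw [hidx (n - 1) (by omega) (by omega)]; exact hv
        obtain ⟨f2', rfl⟩ : ∃ f2', f2 = f2' + 1 := ⟨f2 - 1, by omega⟩
        have hcond : (0:Int) ≤ n - 1 ∧ n - 1 < (col.length : Int) := ⟨by omega, by rw [hlen]; omega⟩
        by_cases hvne : v = -1
        · rw [show vtUpA nb j (f1' + 1) n s c = (s, c) by
                simp only [vtUpA]; rw [if_pos hg, hv]; simp [hvne],
              show vtRun col (-1) (f2' + 1) (n - 1) = (0, 0) by
                simp only [vtRun]; rw [if_pos hcond, hv']; simp [hvne]]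
          simp
        · rw [show vtUpA nb j (f1' + 1) n s c = vtUpA nb j f1' (n - 1) (s + v) (c + 1) by
                simp only [vtUpA]; rw [if_pos hg, hv]; simp [hvne],
              show vtRun col (-1) (f2' + 1) (n - 1) =
                  ((vtRun col (-1) f2' (n - 2)).1 + v, (vtRun col (-1) f2' (n - 2)).2 + 1) by
                simp only [vtRun]
                rw [if_pos hcond, hv']
                simp [hvne, show n - 1 + -1 = n - 2 by ring],
              ih f2' (n - 1) (s + v) (c + 1) (by omega) (by omega) (by omega),
              show n - 1 - 1 = n - 2 by ring]
          simp only [Prod.mk.injEq]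
          constructor <;> ring_nf
      · rw [vtRun_stop col (-1) f2 (n - 1) (by rw [hlen]; omega)]
        simp only [vtUpA]
        rw [if_neg hg]
        simp

lemma downA_eq_run (nb : List (List Int)) (col : List Int) (j : Int)
    (hcol : ∀ row ∈ nb, -(row.length : Int) ≤ j ∧ j < (row.length : Int))
    (hlen : col.length = nb.length)
    (hidx : ∀ r : Int, 0 ≤ r → r < (nb.length : Int) → PySem.List.pyGet? col r = pvGet2 nb r j) :
    ∀ (f1 f2 : Nat) (n s c : Int), -1 ≤ n →
      ((nb.length : Int) - (n + 1)).toNat ≤ f1 → ((nb.length : Int) - (n + 1)).toNat ≤ f2 →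
      vtDownA nb j f1 n s c =
        (s + (vtRun col 1 f2 (n + 1)).1, c + (vtRun col 1 f2 (n + 1)).2) := by
  intro f1
  induction f1 with
  | zero =>
      intro f2 n s c hn hf1 hf2
      rw [vtRun_stop col 1 f2 (n + 1) (by rw [hlen]; omega)]
      simp [vtDownA]
  | succ f1' ih =>
      intro f2 n s c hn hf1 hf2
      by_cases hg : n + 1 < (nb.length : Int)
      · obtain ⟨v, hv⟩ := pvGet2_some nb j (n + 1) hcol (by omega) hg
        have hv' : PySem.List.pyGet? col (n + 1) = some v := by
          rw [hidx (n + 1) (by omega) hg]; exact hv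
        obtain ⟨f2', rfl⟩ : ∃ f2', f2 = f2' + 1 := ⟨f2 - 1, by omega⟩
        have hcond : (0:Int) ≤ n + 1 ∧ n + 1 < (col.length : Int) := ⟨by omega, by rw [hlen]; omega⟩
        by_cases hvne : v = -1
        · rw [show vtDownA nb j (f1' + 1) n s c = (s, c) by
                simp only [vtDownA]; rw [if_pos hg, hv]; simp [hvne],
              show vtRun col 1 (f2' + 1) (n + 1) = (0, 0) by
                simp only [vtRun]; rw [if_pos hcond, hv']; simp [hvne]]
          simp
        · rw [show vtDownA nb j (f1' + 1) n s c = vtDownA nb j f1' (n + 1) (s + v) (c + 1) by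
                simp only [vtDownA]; rw [if_pos hg, hv]; simp [hvne],
              show vtRun col 1 (f2' + 1) (n + 1) =
                  ((vtRun col 1 f2' (n + 2)).1 + v, (vtRun col 1 f2' (n + 2)).2 + 1) by
                simp only [vtRun]
                rw [if_pos hcond, hv']
                simp [hvne, show n + 1 + 1 = n + 2 by ring],
              ih f2' (n + 1) (s + v) (c + 1) (by omega) (by omega) (by omega)]
          simp only [Prod.mk.injEq]
          constructor <;> ring_nf
      · rw [vtRun_stop col 1 f2 (n + 1) (by rw [hlen]; omega)]
        simp only [vtDownA]
        rw [if_neg hg]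
        simp

-- ===== VERDICT (by name: the statement is the Claim_ definition above) =====
theorem verticalTotal_spec : Claim_unchanged_verticalTotal := by
  intro i j val nb _hDom hPre
  obtain ⟨_hi0, hi2, hcol⟩ := hPre
  unfold Spec_verticalTotal D_verticalTotal
  intro hnd
  have hi1 : -1 ≤ i := by omega
  obtain ⟨col, hc, hlen, hidx⟩ := vtCol_spec nb j hcol
  unfold verticalTotal verticalTotal_alt
  rw [hc]
  rw [upA_eq_run nb col j hcol hlen hidx i.toNat col.length i val 1 hi2 le_rfl (by omega)]
  rw [downA_eq_run nb col j hcol hlen hidx (nb.length + (-i).toNat + 1) col.length i _ _ hi1 (by omega) (by omega)]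

theorem verticalTotal_changed : Claim_changed_verticalTotal := by
  unfold Claim_changed_verticalTotal; decide
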